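-- pv_equiv track=rewrite | github.com/DanElias/ACM-CODE | python/Meta_Encrypted_Words_Recursive.py | encriptRecursive
-- ===== SOURCE A (Python) =====
-- def encriptRecursive(s, left, right): # abc, 0, 2 / abc, 0, 1 / abc, 0, 0 / abc, 1, 1 / abc 2, 2
--
--   if left > right: # 0 == 0
--     return ""
--
--   if left == right:
--     return s[left]
--
--   mid = left + ((right - left) // 2); # 1 / 0 / 1
--   mid_char = s[mid] # b / a
--   result = [mid_char] # [b] / [a]
--
--   #left
--   result.append(encriptRecursive(s, left, mid - 1)) # [b, a] / [a, "", ""] /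
--   #right
--   result.append(encriptRecursive(s, mid + 1, right)) # / [a, "", ""]
--
--   return "".join(result) # [a]
-- ===== SOURCE B (Python) =====
-- def encriptRecursive(s, left, right):
--     result = []
--     stack = [(left, right)]
--     while stack:
--         l, r = stack.pop()
--         if l > r:
--             continue
--         mid = l + ((r - l) // 2)
--         result.append(s[mid])
--         stack.append((mid + 1, r))
--         stack.append((l, mid - 1))
--     return "".join(result)
-- ===== Notes on version B (the rewrite author's own statement) =====
-- stated objective: alternative
-- what changed: Replaces the recursion (and per-call list building + join) with an explicit stack of (left,right) intervals and a single output list, emitting s[mid] at visit time in preorder.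
import Mathlib
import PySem

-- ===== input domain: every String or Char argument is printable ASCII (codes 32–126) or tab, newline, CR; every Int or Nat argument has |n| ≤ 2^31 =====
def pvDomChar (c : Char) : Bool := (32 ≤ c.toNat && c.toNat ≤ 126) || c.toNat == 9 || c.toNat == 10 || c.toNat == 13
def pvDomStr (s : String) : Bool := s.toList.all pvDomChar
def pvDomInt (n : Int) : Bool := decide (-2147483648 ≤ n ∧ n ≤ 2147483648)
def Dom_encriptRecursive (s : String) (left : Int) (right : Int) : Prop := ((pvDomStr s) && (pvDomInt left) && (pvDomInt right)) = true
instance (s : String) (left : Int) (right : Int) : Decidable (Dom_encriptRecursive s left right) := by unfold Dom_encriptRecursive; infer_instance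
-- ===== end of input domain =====

-- B replaces A's recursion with an explicit interval stack and one output list (alternative decomposition, same cost).

-- ===== PORT A =====
-- A on the code-point list; s[i] is PySem.List.pyGet? (none = IndexError, excluded by Pre_; .toList defaults to []).
-- The Nat fuel is only a totality guard: (r - l + 1).toNat + 1 always suffices (interval size shrinks at each call).
def pvARecF (fuel : Nat) (cs : List Char) (l r : Int) : List Char :=
  match fuel with
  | 0 => []
  | fuel + 1 =>
    if l > r then []
    else if l = r then (PySem.List.pyGet? cs l).toList
    else
      let mid := l + PySem.Int.floordiv (r - l) 2
      -- result = [mid_char]; append(rec left); append(rec right); "".join(result)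
      (PySem.List.pyGet? cs mid).toList ++ pvARecF fuel cs l (mid - 1) ++ pvARecF fuel cs (mid + 1) r

def encriptRecursive (s : String) (left : Int) (right : Int) : String :=
  String.ofList (pvARecF ((right - left + 1).toNat + 1) s.toList left right)

-- ===== PORT B =====
-- explicit stack (head = top); pops (l,r), emits s[mid], pushes right then left interval.
-- The Nat fuel is only a totality guard: the weighted stack measure drops at every iteration, and the
-- initial fuel 2*(r-l+1).toNat + 2 exceeds the initial measure.
def pvBLoopF (fuel : Nat) (cs : List Char) (stack : List (Int × Int)) (acc : List Char) : List Char :=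
  match fuel with
  | 0 => acc
  | fuel + 1 =>
    match stack with
    | [] => acc
    | (l, r) :: rest =>
      if l > r then pvBLoopF fuel cs rest acc
      else
        let mid := l + PySem.Int.floordiv (r - l) 2
        pvBLoopF fuel cs ((l, mid - 1) :: (mid + 1, r) :: rest)
          (acc ++ (PySem.List.pyGet? cs mid).toList)

def encriptRecursive_alt (s : String) (left : Int) (right : Int) : String :=
  String.ofList (pvBLoopF (2 * (right - left + 1).toNat + 2) s.toList [(left, right)] [])

-- ===== PRECONDITION & SPEC =====
-- Pre_ admits exactly the inputs on which Python A returns (A raises IndexError iff the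
-- nonempty interval [left,right] contains an index outside Python's range -len..len-1).
def Pre_encriptRecursive (s : String) (left : Int) (right : Int) : Prop :=
  left > right ∨ (-(PySem.Str.len s) ≤ left ∧ right < PySem.Str.len s)
instance (s : String) (left : Int) (right : Int) : Decidable (Pre_encriptRecursive s left right) := by unfold Pre_encriptRecursive; infer_instance
def pvWitness_encriptRecursive : String × Int × Int := ("abc", 0, 2)

def Spec_encriptRecursive (s : String) (left : Int) (right : Int) (out : String) : Prop := out = encriptRecursive_alt s left right
instance (s : String) (left : Int) (right : Int) (out : String) : Decidable (Spec_encriptRecursive s left right out) := by unfold Spec_encriptRecursive; infer_instance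

-- ===== CLAIM (what is proved, stated in full; the proofs are below) =====
def Claim_equal_encriptRecursive : Prop := ∀ (s : String) (left : Int) (right : Int), Dom_encriptRecursive s left right → Pre_encriptRecursive s left right → Spec_encriptRecursive s left right (encriptRecursive s left right)

-- ===== LEMMAS AND PROOFS =====

-- midpoint stays inside a nonempty interval
theorem pvMidBounds (l r : Int) (h : l ≤ r) :
    l ≤ l + PySem.Int.floordiv (r - l) 2 ∧ l + PySem.Int.floordiv (r - l) 2 ≤ r := by
  rw [PySem.Int.floordiv_eq_ediv_of_pos (by omega)]
  omega

-- any sufficient fuel computes the same value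
theorem pvARecF_fuel (cs : List Char) :
    ∀ (f g : Nat) (l r : Int), (r - l + 1).toNat < f → (r - l + 1).toNat < g →
      pvARecF f cs l r = pvARecF g cs l r := by
  intro f
  induction f with
  | zero => intro g l r hf _; exact absurd hf (Nat.not_lt_zero _)
  | succ f ih =>
    intro g l r hf hg
    match g, hg with
    | g + 1, hg =>
      by_cases h1 : l > r
      · simp [pvARecF, h1]
      · by_cases h2 : l = r
        · simp [pvARecF, h2]
        · have hm := pvMidBounds l r (by omega)
          simp only [pvARecF, if_neg h1, if_neg h2]
          rw [ih g l (l + PySem.Int.floordiv (r - l) 2 - 1) (by omega) (by omega),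
              ih g (l + PySem.Int.floordiv (r - l) 2 + 1) r (by omega) (by omega)]

-- A's recursion step, valid also at l = r (where A short-circuits to s[l] = the same value)
theorem pvA_split (cs : List Char) (l r : Int) (h : l ≤ r) :
    pvARecF ((r - l + 1).toNat + 1) cs l r =
      (PySem.List.pyGet? cs (l + PySem.Int.floordiv (r - l) 2)).toList ++
        pvARecF ((l + PySem.Int.floordiv (r - l) 2 - 1 - l + 1).toNat + 1) cs l
          (l + PySem.Int.floordiv (r - l) 2 - 1) ++
        pvARecF ((r - (l + PySem.Int.floordiv (r - l) 2 + 1) + 1).toNat + 1) cs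
          (l + PySem.Int.floordiv (r - l) 2 + 1) r := by
  have hm := pvMidBounds l r h
  by_cases h2 : l = r
  · subst h2
    have hm0 : PySem.Int.floordiv (l - l) 2 = 0 := by
      rw [PySem.Int.floordiv_eq_ediv_of_pos (by omega)]; omega
    simp [pvARecF]
  · generalize hA : ((l + PySem.Int.floordiv (r - l) 2 - 1 - l + 1).toNat + 1) = fA
    generalize hB : ((r - (l + PySem.Int.floordiv (r - l) 2 + 1) + 1).toNat + 1) = fB
    simp only [pvARecF, if_neg (show ¬ l > r by omega), if_neg h2]
    rw [pvARecF_fuel cs (r - l + 1).toNat fA l (l + PySem.Int.floordiv (r - l) 2 - 1) (by omega) (by omega),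
        pvARecF_fuel cs (r - l + 1).toNat fB (l + PySem.Int.floordiv (r - l) 2 + 1) r (by omega) (by omega)]

-- weighted stack measure driving B's loop
def pvMu (stack : List (Int × Int)) : Nat :=
  (stack.map (fun p => 2 * (p.2 - p.1 + 1).toNat + 1)).sum

-- loop invariant: given enough fuel, the stack loop produces acc ++ A's preorder output of each pending interval
theorem pvBLoopF_spec (cs : List Char) :
    ∀ (f : Nat) (stack : List (Int × Int)) (acc : List Char), pvMu stack < f →
      pvBLoopF f cs stack acc =
        acc ++ stack.flatMap (fun p => pvARecF ((p.2 - p.1 + 1).toNat + 1) cs p.1 p.2) := by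
  intro f
  induction f with
  | zero => intro stack acc hf; exact absurd hf (Nat.not_lt_zero _)
  | succ f ih =>
    intro stack acc hf
    match stack with
    | [] => simp [pvBLoopF]
    | (l, r) :: rest =>
      by_cases h1 : l > r
      · rw [pvBLoopF]
        simp only [if_pos h1]
        rw [ih rest acc (by simp [pvMu] at hf ⊢; omega)]
        have hz : pvARecF ((r - l + 1).toNat + 1) cs l r = [] := by simp [pvARecF, h1]
        simp [hz]
      · have hm := pvMidBounds l r (by omega)
        rw [pvBLoopF]
        simp only [if_neg h1]
        rw [ih ((l, l + PySem.Int.floordiv (r - l) 2 - 1) :: (l + PySem.Int.floordiv (r - l) 2 + 1, r) :: rest)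
              (acc ++ (PySem.List.pyGet? cs (l + PySem.Int.floordiv (r - l) 2)).toList)
              (by simp [pvMu] at hf ⊢; omega)]
        simp only [List.flatMap_cons, List.append_assoc]
        rw [pvA_split cs l r (by omega)]
        simp [List.append_assoc]

-- ===== VERDICT (by name: the statement is the Claim_ definition above) =====
theorem encriptRecursive_spec : Claim_equal_encriptRecursive := by
  intro s left right _ _
  unfold Spec_encriptRecursive encriptRecursive encriptRecursive_alt
  rw [pvBLoopF_spec s.toList _ _ _ (by simp [pvMu])]
  simp
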